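-- pv_equiv track=rewrite | github.com/mpgossage/advent2024 | day19.py | towel_pattern_count
-- ===== SOURCE A (Python) =====
-- def towel_pattern_count(tokens, pattern, cache):
--     "returns number of ways that pattern can be made (0 for error)"
--     # simple recursive solution
--     if pattern in cache:
--         return cache[pattern]
--     count = 0
--     for t in tokens:
--         if pattern.startswith(t):
--             count += towel_pattern_count(tokens, pattern[len(t) :], cache)
--     cache[pattern] = count
--     return count
-- ===== SOURCE B (Python) =====
-- def towel_pattern_count(tokens, pattern, cache):
--     "returns number of ways that pattern can be made (0 for error)"
--     # bottom-up DP over suffix start positions; honors any pre-seeded cache entries.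
--     # Note: unlike the original it does not write memo entries back into `cache`
--     # (equivalence here is about the return value only).
--     n = len(pattern)
--     dp = [0] * (n + 1)
--     for i in range(n, -1, -1):
--         suffix = pattern[i:]
--         if suffix in cache:
--             dp[i] = cache[suffix]
--         else:
--             dp[i] = sum(dp[i + len(t)] for t in tokens if suffix.startswith(t))
--     return dp[0]
-- ===== Notes on version B (the rewrite author's own statement) =====
-- stated objective: alternative
-- what changed: Replaces the top-down memoized recursion (which also mutates the caller's cache dict; return-value equivalence only) by an iterative bottom-up DP over suffix start positions that consults the pre-seeded cache at every suffix.
import Mathlib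
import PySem

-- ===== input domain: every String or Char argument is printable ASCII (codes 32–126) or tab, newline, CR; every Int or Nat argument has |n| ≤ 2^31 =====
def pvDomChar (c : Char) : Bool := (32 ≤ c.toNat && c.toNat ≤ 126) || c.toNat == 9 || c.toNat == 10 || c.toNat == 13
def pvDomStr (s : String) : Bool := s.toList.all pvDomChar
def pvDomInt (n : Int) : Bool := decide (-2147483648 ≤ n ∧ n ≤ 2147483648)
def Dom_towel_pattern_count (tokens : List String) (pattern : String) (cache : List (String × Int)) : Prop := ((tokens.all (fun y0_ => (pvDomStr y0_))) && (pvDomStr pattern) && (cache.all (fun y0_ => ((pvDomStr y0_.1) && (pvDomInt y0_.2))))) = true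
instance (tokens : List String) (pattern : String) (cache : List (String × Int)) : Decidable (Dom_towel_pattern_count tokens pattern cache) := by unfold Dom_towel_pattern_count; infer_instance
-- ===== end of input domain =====

-- B replaces A's top-down memoized recursion (which also writes memo entries into `cache`, an
-- observable mutation) by a bottom-up DP table over suffix start positions; the equivalence
-- proved here is about the RETURN value only (B does not mutate `cache`).

-- ===== PORT A =====
-- A's recursion threads the mutated memo dict through; the fuel (|pattern| + 1) only makes the
-- definition total: inside Pre_ every recursive call strictly shortens the pattern.
def towelAuxA (tokens : List String) : Nat → String → PySem.Dict String Int → Int × PySem.Dict String Int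
  | 0, _, cache => (0, cache)    -- fuel guard only; unreachable under Pre_
  | fuel + 1, pattern, cache =>
    match cache.get? pattern with
    | some v => (v, cache)                                   -- if pattern in cache: return cache[pattern]
    | none =>
      let r := tokens.foldl (fun acc t =>                    -- count = 0; for t in tokens: …
        if PySem.Str.startswith pattern t then
          let cr := towelAuxA tokens fuel (PySem.Str.slice pattern (some (PySem.Str.len t)) none) acc.2
          (acc.1 + cr.1, cr.2)                               -- count += towel_pattern_count(tokens, pattern[len(t):], cache)
        else acc) ((0 : Int), cache)
      (r.1, r.2.insert pattern r.1)                          -- cache[pattern] = count; return count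

def towel_pattern_count (tokens : List String) (pattern : String) (cache : List (String × Int)) : Int :=
  (towelAuxA tokens (pattern.toList.length + 1) pattern (PySem.Dict.mk cache)).1

-- ===== PORT B =====
def towel_pattern_count_alt (tokens : List String) (pattern : String) (cache : List (String × Int)) : Int :=
  let n : Int := PySem.Str.len pattern
  let dp0 : List Int := List.replicate (pattern.toList.length + 1) 0        -- dp = [0] * (n + 1)
  let dp := (PySem.List.pyRange n (-1) (-1)).foldl (fun dp i =>             -- for i in range(n, -1, -1):
      let suffix := PySem.Str.slice pattern (some i) none                   --   suffix = pattern[i:]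
      let v : Int :=
        match (PySem.Dict.mk cache).get? suffix with
        | some w => w                                                       --   dp[i] = cache[suffix]
        | none => tokens.foldl (fun a t =>                                  --   dp[i] = sum(dp[i+len(t)] for t … if suffix.startswith(t))
            if PySem.Str.startswith suffix t then a + PySem.List.pyGetD dp (i + PySem.Str.len t) 0 else a) 0
      PySem.List.pySetD dp i v) dp0
  PySem.List.pyGetD dp 0 0                                                  -- return dp[0]

-- ===== PRECONDITION & SPEC =====
-- Pre_ excludes exactly the inputs on which A never returns: with an empty token and the
-- pattern not a key of cache, A recurses on the unchanged pattern forever (RecursionError).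
def Pre_towel_pattern_count (tokens : List String) (pattern : String) (cache : List (String × Int)) : Prop :=
  "" ∉ tokens ∨ pattern ∈ cache.map Prod.fst
instance (tokens : List String) (pattern : String) (cache : List (String × Int)) : Decidable (Pre_towel_pattern_count tokens pattern cache) := by unfold Pre_towel_pattern_count; infer_instance

def pvWitness_towel_pattern_count : List String × String × (List (String × Int)) :=
  (["a", "ab"], "aab", [("b", 2)])

def Spec_towel_pattern_count (tokens : List String) (pattern : String) (cache : List (String × Int)) (out : Int) : Prop := out = towel_pattern_count_alt tokens pattern cache
instance (tokens : List String) (pattern : String) (cache : List (String × Int)) (out : Int) : Decidable (Spec_towel_pattern_count tokens pattern cache out) := by unfold Spec_towel_pattern_count; infer_instance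

-- ===== CLAIM (what is proved, stated in full; the proofs are below) =====
def Claim_equal_towel_pattern_count : Prop := ∀ (tokens : List String) (pattern : String) (cache : List (String × Int)), Dom_towel_pattern_count tokens pattern cache → Pre_towel_pattern_count tokens pattern cache → Spec_towel_pattern_count tokens pattern cache (towel_pattern_count tokens pattern cache)

-- ===== LEMMAS AND PROOFS =====

-- The pure value both programs compute: number of ways w.r.t. the ORIGINAL cache c0 (fuel-indexed).
def pureWays (tokens : List String) (c0 : PySem.Dict String Int) : Nat → String → Int
  | 0, _ => 0
  | fuel + 1, s =>
    match c0.get? s with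
    | some v => v
    | none => tokens.foldl (fun a t =>
        if PySem.Str.startswith s t then
          a + pureWays tokens c0 fuel (PySem.Str.slice s (some (PySem.Str.len t)) none)
        else a) 0

lemma toList_sliceFrom (s : String) (m : Nat) :
    (PySem.Str.slice s (some (m : Int)) none).toList = s.toList.drop m := by
  rw [PySem.Str.toList_slice, PySem.Chars.slice_eq_listSlice,
    PySem.List.slice_from _ (by positivity : (0:Int) ≤ (m : Int))]
  simp

lemma toList_sliceLen (s t : String) :
    (PySem.Str.slice s (some (PySem.Str.len t)) none).toList = s.toList.drop t.toList.length := by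
  rw [PySem.Str.len_eq, toList_sliceFrom]

lemma startswith_facts {s t : String} (hsw : PySem.Chars.startswith s.toList t.toList = true) (ht : t ≠ "") :
    1 ≤ t.toList.length ∧ t.toList.length ≤ s.toList.length := by
  rw [PySem.Chars.startswith_iff] at hsw
  refine ⟨?_, hsw.length_le⟩
  rcases Nat.eq_zero_or_pos t.toList.length with h | h
  · exact absurd (String.toList_inj.mp (by simpa using List.length_eq_zero_iff.mp h)) ht
  · exact h

lemma pureWays_fuel {tokens : List String} (hnz : "" ∉ tokens) (c0 : PySem.Dict String Int) :
    ∀ (f1 : Nat) (s : String) (f2 : Nat), s.toList.length < f1 → s.toList.length < f2 →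
      pureWays tokens c0 f1 s = pureWays tokens c0 f2 s := by
  intro f1
  induction f1 with
  | zero => intro s f2 h1 _; omega
  | succ f1' ih =>
    intro s f2 h1 h2
    cases f2 with
    | zero => omega
    | succ f2' =>
      simp only [pureWays]
      cases hc : c0.get? s with
      | some v => rfl
      | none =>
        refine PySem.List.foldl_congr_mem _ _ _ _ ?_
        intro acc t htok
        by_cases hsw : PySem.Chars.startswith s.toList t.toList = true
        · have ht : t ≠ "" := fun h => hnz (h ▸ htok)
          obtain ⟨h1t, h2t⟩ := startswith_facts (by rw [← PySem.Str.startswith_eq]; exact hsw) ht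
          have hlen : (PySem.Str.slice s (some (PySem.Str.len t)) none).toList.length
              = s.toList.length - t.toList.length := by
            rw [toList_sliceLen]; simp
          have hsw' : PySem.Str.startswith s t = true := by
            rw [PySem.Str.startswith_eq]; exact hsw
          rw [if_pos hsw', if_pos hsw', ih _ f2' (by omega) (by omega)]
        · have hsw' : ¬ PySem.Str.startswith s t = true := by
            rw [PySem.Str.startswith_eq]; exact hsw
          rw [if_neg hsw', if_neg hsw']

-- Invariant on the threaded memo dict: entries of c0 are untouched; every entry is correct.
def InvA (tokens : List String) (c0 c : PySem.Dict String Int) : Prop :=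
  (∀ k, (c0.get? k).isSome → c.get? k = c0.get? k) ∧
  (∀ k v, c.get? k = some v → v = pureWays tokens c0 (k.toList.length + 1) k)

lemma A_main {tokens : List String} (hnz : "" ∉ tokens) (c0 : PySem.Dict String Int) :
    ∀ (fuel : Nat) (s : String) (c : PySem.Dict String Int),
      s.toList.length < fuel → InvA tokens c0 c →
      (towelAuxA tokens fuel s c).1 = pureWays tokens c0 (s.toList.length + 1) s ∧
      InvA tokens c0 (towelAuxA tokens fuel s c).2 := by
  intro fuel
  induction fuel with
  | zero => intro s c h _; omega
  | succ fuel ih =>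
    intro s c hlen hinv
    have loop : ∀ (l : List String), (∀ t ∈ l, t ∈ tokens) →
        ∀ (p : Int × PySem.Dict String Int), InvA tokens c0 p.2 →
        (l.foldl (fun acc t =>
            if PySem.Str.startswith s t then
              let cr := towelAuxA tokens fuel (PySem.Str.slice s (some (PySem.Str.len t)) none) acc.2
              (acc.1 + cr.1, cr.2)
            else acc) p).1
          = l.foldl (fun a t =>
              if PySem.Str.startswith s t then
                a + pureWays tokens c0 s.toList.length (PySem.Str.slice s (some (PySem.Str.len t)) none)
              else a) p.1 ∧
        InvA tokens c0 (l.foldl (fun acc t =>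
            if PySem.Str.startswith s t then
              let cr := towelAuxA tokens fuel (PySem.Str.slice s (some (PySem.Str.len t)) none) acc.2
              (acc.1 + cr.1, cr.2)
            else acc) p).2 := by
      intro l
      induction l with
      | nil => intro _ p hp; exact ⟨rfl, hp⟩
      | cons t ts iht =>
        intro hsub p hp
        simp only [List.foldl_cons]
        by_cases hsw : PySem.Str.startswith s t = true
        · have ht : t ≠ "" := fun h => hnz (h ▸ hsub t (by simp))
          obtain ⟨h1t, h2t⟩ := startswith_facts (by rw [← PySem.Str.startswith_eq]; exact hsw) ht
          have hslen : (PySem.Str.slice s (some (PySem.Str.len t)) none).toList.length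
              = s.toList.length - t.toList.length := by rw [toList_sliceLen]; simp
          have hrec := ih (PySem.Str.slice s (some (PySem.Str.len t)) none) p.2 (by omega) hp
          have hval : (towelAuxA tokens fuel (PySem.Str.slice s (some (PySem.Str.len t)) none) p.2).1
              = pureWays tokens c0 s.toList.length (PySem.Str.slice s (some (PySem.Str.len t)) none) := by
            rw [hrec.1]
            exact pureWays_fuel hnz c0 _ _ _ (by omega) (by omega)
          rw [if_pos hsw, if_pos hsw]
          have := iht (fun u hu => hsub u (by simp [hu]))
            (p.1 + (towelAuxA tokens fuel (PySem.Str.slice s (some (PySem.Str.len t)) none) p.2).1,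
             (towelAuxA tokens fuel (PySem.Str.slice s (some (PySem.Str.len t)) none) p.2).2) hrec.2
          refine ⟨?_, this.2⟩
          rw [this.1, hval]
        · rw [if_neg hsw, if_neg hsw]
          exact iht (fun u hu => hsub u (by simp [hu])) p hp
    simp only [towelAuxA]
    cases hc : c.get? s with
    | some v => exact ⟨hinv.2 s v hc, hinv⟩
    | none =>
      have hc0 : c0.get? s = none := by
        cases hc0 : c0.get? s with
        | none => rfl
        | some w =>
          have := hinv.1 s (by simp [hc0])
          rw [hc, hc0] at this; cases this
      have hloop := loop tokens (fun _ h => h) ((0 : Int), c) hinv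
      have hways : pureWays tokens c0 (s.toList.length + 1) s
          = tokens.foldl (fun a t =>
              if PySem.Str.startswith s t then
                a + pureWays tokens c0 s.toList.length (PySem.Str.slice s (some (PySem.Str.len t)) none)
              else a) 0 := by
        simp only [pureWays, hc0]
      refine ⟨by rw [hloop.1]; exact hways.symm, ?_, ?_⟩
      · intro k hk
        have hk_ne : k ≠ s := by
          intro h; rw [h, hc0] at hk; simp at hk
        rw [PySem.Dict.get?_insert_of_ne _ _ hk_ne]
        exact hloop.2.1 k hk
      · intro k v hk
        rw [PySem.Dict.get?_insert] at hk
        split at hk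
        · rename_i heq
          cases hk
          rw [heq, hloop.1]
          exact hways.symm
        · exact hloop.2.2 k v hk


-- B-side helpers: the loop body of port B, named for the proofs (definitional).
def stepB (tokens : List String) (pattern : String) (c0 : PySem.Dict String Int) (dp : List Int) (i : Int) : List Int :=
  let suffix := PySem.Str.slice pattern (some i) none
  let v : Int :=
    match c0.get? suffix with
    | some w => w
    | none => tokens.foldl (fun a t =>
        if PySem.Str.startswith suffix t then a + PySem.List.pyGetD dp (i + PySem.Str.len t) 0 else a) 0
  PySem.List.pySetD dp i v

lemma alt_eq (tokens : List String) (pattern : String) (cache : List (String × Int)) :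
    towel_pattern_count_alt tokens pattern cache
      = PySem.List.pyGetD ((PySem.List.pyRange (PySem.Str.len pattern) (-1) (-1)).foldl
          (stepB tokens pattern (PySem.Dict.mk cache)) (List.replicate (pattern.toList.length + 1) 0)) 0 0 := rfl

lemma stepB_length (tokens : List String) (pattern : String) (c0 : PySem.Dict String Int)
    (dp : List Int) (i : Int) : (stepB tokens pattern c0 dp i).length = dp.length := by
  simp [stepB, PySem.List.length_pySetD]

lemma foldB_length (tokens : List String) (pattern : String) (c0 : PySem.Dict String Int) :
    ∀ (l : List Int) (dp : List Int), (l.foldl (stepB tokens pattern c0) dp).length = dp.length := by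
  intro l
  induction l with
  | nil => intro dp; rfl
  | cons i is ih => intro dp; rw [List.foldl_cons, ih, stepB_length]

lemma sfx_add (pattern t : String) (k : Nat) :
    PySem.Str.slice (PySem.Str.slice pattern (some (k : Int)) none) (some (PySem.Str.len t)) none
      = PySem.Str.slice pattern (some ((k + t.toList.length : Nat) : Int)) none := by
  apply String.toList_inj.mp
  rw [toList_sliceLen, toList_sliceFrom, toList_sliceFrom, List.drop_drop]

lemma len_sfx (pattern : String) (k : Nat) :
    (PySem.Str.slice pattern (some (k : Int)) none).toList.length = pattern.toList.length - k := by
  rw [toList_sliceFrom]; simp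

lemma sfx_zero (pattern : String) : PySem.Str.slice pattern (some ((0 : Nat) : Int)) none = pattern := by
  apply String.toList_inj.mp
  rw [toList_sliceFrom]; simp

lemma stepB_spec {tokens : List String} (hnz : "" ∉ tokens) (c0 : PySem.Dict String Int)
    (pattern : String) (k : Nat) (hk : k ≤ pattern.toList.length)
    (dp : List Int) (hdl : dp.length = pattern.toList.length + 1)
    (hdp : ∀ j : Nat, k < j → j ≤ pattern.toList.length → dp.getD j 0
        = pureWays tokens c0 (pattern.toList.length - j + 1) (PySem.Str.slice pattern (some (j : Int)) none)) :
    ∀ j : Nat, j ≤ pattern.toList.length → (stepB tokens pattern c0 dp ((k : Nat) : Int)).getD j 0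
      = if j = k then pureWays tokens c0 (pattern.toList.length - k + 1) (PySem.Str.slice pattern (some (k : Int)) none)
        else dp.getD j 0 := by
  intro j hj
  have hset : stepB tokens pattern c0 dp ((k : Nat) : Int)
      = dp.set k (let suffix := PySem.Str.slice pattern (some (k : Int)) none
          match c0.get? suffix with
          | some w => w
          | none => tokens.foldl (fun a t =>
              if PySem.Str.startswith suffix t then a + PySem.List.pyGetD dp ((k : Int) + PySem.Str.len t) 0 else a) 0) := by
    rw [stepB, PySem.List.pySetD_natCast]
  rw [hset]
  by_cases hjk : j = k
  · subst hjk
    rw [if_pos rfl, List.getD_eq_getElem?_getD, List.getElem?_set_self' ]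
    have hval : (let suffix := PySem.Str.slice pattern (some (j : Int)) none
          match c0.get? suffix with
          | some w => w
          | none => tokens.foldl (fun a t =>
              if PySem.Str.startswith suffix t then a + PySem.List.pyGetD dp ((j : Int) + PySem.Str.len t) 0 else a) 0)
        = pureWays tokens c0 (pattern.toList.length - j + 1) (PySem.Str.slice pattern (some (j : Int)) none) := by
      show (match c0.get? (PySem.Str.slice pattern (some (j : Int)) none) with
          | some w => w
          | none => tokens.foldl (fun a t =>
              if PySem.Str.startswith (PySem.Str.slice pattern (some (j : Int)) none) t then
                a + PySem.List.pyGetD dp ((j : Int) + PySem.Str.len t) 0 else a) 0) = _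
      cases hcc : c0.get? (PySem.Str.slice pattern (some (j : Int)) none) with
      | some w => simp only [pureWays, hcc]
      | none =>
        simp only [pureWays, hcc]
        refine PySem.List.foldl_congr_mem _ _ _ _ ?_
        intro acc t htok
        by_cases hsw : PySem.Chars.startswith (PySem.Str.slice pattern (some (j : Int)) none).toList t.toList = true
        · have ht : t ≠ "" := fun h => hnz (h ▸ htok)
          obtain ⟨h1t, h2t⟩ := startswith_facts hsw ht
          have hlen : t.toList.length ≤ pattern.toList.length - j := by
            rw [len_sfx] at h2t; omega
          have hsw' : PySem.Str.startswith (PySem.Str.slice pattern (some (j : Int)) none) t = true := by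
            rw [PySem.Str.startswith_eq]; exact hsw
          rw [if_pos hsw', if_pos hsw']
          have hidx : (j : Int) + PySem.Str.len t = ((j + t.toList.length : Nat) : Int) := by
            rw [PySem.Str.len_eq]; push_cast; omega
          rw [hidx, PySem.List.pyGetD_natCast,
            hdp (j + t.toList.length) (by omega) (by omega), sfx_add,
            pureWays_fuel hnz c0 _ _ (pattern.toList.length - j) (by rw [len_sfx]; omega)
              (by rw [len_sfx]; omega)]
        · have hsw' : ¬ PySem.Str.startswith (PySem.Str.slice pattern (some (j : Int)) none) t = true := by
            rw [PySem.Str.startswith_eq]; exact hsw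
          rw [if_neg hsw', if_neg hsw']
    rw [hval]
    simp [show j < dp.length by omega]
  · rw [if_neg hjk, List.getD_eq_getElem?_getD, List.getElem?_set_ne (fun h => hjk h.symm),
      ← List.getD_eq_getElem?_getD]

lemma B_fold {tokens : List String} (hnz : "" ∉ tokens) (c0 : PySem.Dict String Int) (pattern : String) :
    ∀ (i : Nat), i ≤ pattern.toList.length → ∀ (dp : List Int), dp.length = pattern.toList.length + 1 →
    (∀ j : Nat, i < j → j ≤ pattern.toList.length → dp.getD j 0
        = pureWays tokens c0 (pattern.toList.length - j + 1) (PySem.Str.slice pattern (some (j : Int)) none)) →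
    ∀ j : Nat, j ≤ pattern.toList.length →
      ((PySem.List.pyRange ((i : Nat) : Int) (-1) (-1)).foldl (stepB tokens pattern c0) dp).getD j 0
        = pureWays tokens c0 (pattern.toList.length - j + 1) (PySem.Str.slice pattern (some (j : Int)) none) := by
  intro i
  induction i with
  | zero =>
    intro _ dp hdl hdp j hj
    have hr : PySem.List.pyRange ((0 : Nat) : Int) (-1) (-1) = [((0 : Nat) : Int)] := by
      rw [PySem.List.pyRange_neg_one_cons (by norm_num), PySem.List.pyRange_neg_one_eq_nil (by norm_num)]
    rw [hr, List.foldl_cons, List.foldl_nil, stepB_spec hnz c0 pattern 0 (by omega) dp hdl hdp j hj]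
    by_cases hj0 : j = 0
    · subst hj0; rw [if_pos rfl]
    · rw [if_neg hj0]; exact hdp j (by omega) hj
  | succ i ih =>
    intro hi dp hdl hdp j hj
    have hr : PySem.List.pyRange ((i + 1 : Nat) : Int) (-1) (-1)
        = ((i + 1 : Nat) : Int) :: PySem.List.pyRange ((i : Nat) : Int) (-1) (-1) := by
      rw [PySem.List.pyRange_neg_one_cons (by push_cast; omega)]
      congr 1
      push_cast
      ring_nf
    rw [hr, List.foldl_cons]
    refine ih (by omega) _ (by rw [stepB_length]; exact hdl) ?_ j hj
    intro j' hj1 hj2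
    rw [stepB_spec hnz c0 pattern (i + 1) (by omega) dp hdl hdp j' hj2]
    by_cases hj' : j' = i + 1
    · subst hj'; rw [if_pos rfl]
    · rw [if_neg hj']; exact hdp j' (by omega) hj2

lemma range_split (n : Nat) :
    PySem.List.pyRange ((n : Nat) : Int) (-1) (-1)
      = PySem.List.pyRange ((n : Nat) : Int) 0 (-1) ++ [(0 : Int)] := by
  rw [PySem.List.pyRange_neg_one_eq_reverse, PySem.List.pyRange_neg_one_eq_reverse]
  have h0 : (-1 : Int) + 1 = 0 := by norm_num
  rw [h0, PySem.List.pyRange_one_cons (by positivity), List.reverse_cons]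

theorem towel_pattern_count_spec : Claim_equal_towel_pattern_count := by
  intro tokens pattern cache _ hpre
  unfold Spec_towel_pattern_count
  by_cases hmem : pattern ∈ cache.map Prod.fst
  · -- pattern is a pre-seeded key: both return cache[pattern]
    obtain ⟨v, hv⟩ : ∃ v, (PySem.Dict.mk cache).get? pattern = some v := by
      cases hh : (PySem.Dict.mk cache).get? pattern with
      | some v => exact ⟨v, rfl⟩
      | none =>
        exact absurd ((PySem.Dict.get?_eq_none_iff_not_mem_keys _ _).mp hh)
          (by rw [PySem.Dict.keys_mk]; simpa using hmem)
    have hA : towel_pattern_count tokens pattern cache = v := by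
      unfold towel_pattern_count
      simp only [towelAuxA, hv]
    have hB : towel_pattern_count_alt tokens pattern cache = v := by
      rw [alt_eq]
      have hn : PySem.Str.len pattern = ((pattern.toList.length : Nat) : Int) := PySem.Str.len_eq pattern
      rw [hn, range_split, List.foldl_append]
      set dpMid := (PySem.List.pyRange ((pattern.toList.length : Nat) : Int) 0 (-1)).foldl
        (stepB tokens pattern (PySem.Dict.mk cache)) (List.replicate (pattern.toList.length + 1) 0) with hmid
      have hlenMid : dpMid.length = pattern.toList.length + 1 := by
        rw [hmid, foldB_length, List.length_replicate]
      have hstep : stepB tokens pattern (PySem.Dict.mk cache) dpMid 0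
          = PySem.List.pySetD dpMid 0 v := by
        show PySem.List.pySetD dpMid 0 (let suffix := PySem.Str.slice pattern (some 0) none
            match (PySem.Dict.mk cache).get? suffix with
            | some w => w
            | none => _) = _
        have hsfx : PySem.Str.slice pattern (some (0 : Int)) none = pattern := by
          have := sfx_zero pattern
          simpa using this
        rw [hsfx]
        simp only [hv]
      rw [List.foldl_cons, List.foldl_nil, hstep]
      have hps : PySem.List.pySetD dpMid 0 v = dpMid.set 0 v := by
        simpa using PySem.List.pySetD_natCast dpMid 0 v
      rw [hps]
      have hpg : PySem.List.pyGetD (dpMid.set 0 v) 0 0 = (dpMid.set 0 v).getD 0 0 := by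
        simpa using PySem.List.pyGetD_natCast (dpMid.set 0 v) 0 0
      rw [hpg, List.getD_eq_getElem?_getD, List.getElem?_set_self']
      simp [show 0 < dpMid.length by omega]
    rw [hA, hB]
  · -- no pre-seeded hit for the whole pattern: both compute pureWays
    have hnz : "" ∉ tokens := hpre.resolve_right hmem
    have hget : (PySem.Dict.mk cache).get? pattern = none := by
      rw [PySem.Dict.get?_eq_none_iff_not_mem_keys, PySem.Dict.keys_mk]
      simpa using hmem
    have hinv : InvA tokens (PySem.Dict.mk cache) (PySem.Dict.mk cache) :=
      ⟨fun _ _ => rfl, fun k v hk => by simp [pureWays, hk]⟩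
    have hA := A_main hnz (PySem.Dict.mk cache) (pattern.toList.length + 1) pattern
      (PySem.Dict.mk cache) (by omega) hinv
    have hB : towel_pattern_count_alt tokens pattern cache
        = pureWays tokens (PySem.Dict.mk cache) (pattern.toList.length + 1) pattern := by
      rw [alt_eq]
      have hn : PySem.Str.len pattern = ((pattern.toList.length : Nat) : Int) := PySem.Str.len_eq pattern
      rw [hn]
      have hfold := B_fold hnz (PySem.Dict.mk cache) pattern pattern.toList.length (le_refl _)
        (List.replicate (pattern.toList.length + 1) 0) (List.length_replicate)
        (fun j h1 h2 => by omega) 0 (by omega)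
      set dpF := (PySem.List.pyRange ((pattern.toList.length : Nat) : Int) (-1) (-1)).foldl
        (stepB tokens pattern (PySem.Dict.mk cache)) (List.replicate (pattern.toList.length + 1) 0) with hdpF
      have hpg : PySem.List.pyGetD dpF 0 0 = dpF.getD 0 0 := by
        simpa using PySem.List.pyGetD_natCast dpF 0 0
      rw [hpg, hfold, sfx_zero]
      norm_num
    rw [hB]
    unfold towel_pattern_count
    exact hA.1
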